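-- pv_equiv track=rewrite | github.com/andersbandt/Financial-Analyzer | src/plaid_integration/plaid_adapter.py | extract_date_range
-- ===== SOURCE A (Python) =====
-- from typing import Dict, List, Optional
--
-- def extract_date_range(plaid_transactions: List[Dict]) -> Optional[tuple]:
--     """
--     Extract the date range from a list of Plaid transactions.
--
--     Args:
--         plaid_transactions: List of transaction dictionaries from Plaid
--
--     Returns:
--         Tuple of (earliest_date, latest_date) as strings, or None if empty
--     """
--     if not plaid_transactions:
--         return None
--
--     dates = [trans.get('date') for trans in plaid_transactions if trans.get('date')]
--
--     if not dates:
--         return None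
--
--     earliest = min(dates)
--     latest = max(dates)
--
--     return earliest, latest
-- ===== SOURCE B (Python) =====
-- def extract_date_range(plaid_transactions):
--     earliest = None
--     latest = None
--     for trans in plaid_transactions:
--         d = trans.get('date')
--         if not d:
--             continue
--         if earliest is None or d < earliest:
--             earliest = d
--         if latest is None or latest < d:
--             latest = d
--     if earliest is None:
--         return None
--     return earliest, latest
-- ===== Notes on version B (the rewrite author's own statement) =====
-- stated objective: alternative
-- what changed: Replaces the intermediate filtered list plus separate min()/max() passes with a single fold over the transactions that maintains running earliest/latest accumulators.
import Mathlib
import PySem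

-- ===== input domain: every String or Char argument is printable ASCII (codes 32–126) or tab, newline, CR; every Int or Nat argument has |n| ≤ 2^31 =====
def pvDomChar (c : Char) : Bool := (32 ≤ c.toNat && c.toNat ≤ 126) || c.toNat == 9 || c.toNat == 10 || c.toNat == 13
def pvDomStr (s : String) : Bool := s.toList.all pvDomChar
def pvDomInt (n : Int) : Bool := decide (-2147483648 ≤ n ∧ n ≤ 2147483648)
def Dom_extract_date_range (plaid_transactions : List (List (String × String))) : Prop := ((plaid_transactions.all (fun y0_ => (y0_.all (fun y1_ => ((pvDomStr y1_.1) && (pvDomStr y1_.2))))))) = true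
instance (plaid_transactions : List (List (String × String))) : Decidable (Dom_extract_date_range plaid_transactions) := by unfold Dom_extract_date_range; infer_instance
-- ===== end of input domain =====

-- B replaces A's filtered list plus separate min()/max() passes by one fold with running earliest/latest accumulators (objective: alternative).

-- ===== PORT A =====
-- [trans.get('date') for trans in plaid_transactions if trans.get('date')]  (falsy = missing key or empty string)
def pvDatesA (plaid_transactions : List (List (String × String))) : List String :=
  plaid_transactions.filterMap (fun trans =>
    match (PySem.Dict.mk trans).get? "date" with
    | none => none
    | some d => if d = "" then none else some d)

def extract_date_range (plaid_transactions : List (List (String × String))) : Option (String × String) :=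
  if plaid_transactions = [] then none
  else
    let dates := pvDatesA plaid_transactions
    if dates = [] then none
    else
      match PySem.List.min? dates (fun x => x), PySem.List.max? dates (fun x => x) with
      | some earliest, some latest => some (earliest, latest)
      | _, _ => none

-- ===== PORT B =====
-- single pass: update running earliest/latest for each truthy date
def pvStepB (acc : Option String × Option String) (trans : List (String × String)) :
    Option String × Option String :=
  match (PySem.Dict.mk trans).get? "date" with
  | none => acc
  | some d =>
    if d = "" then acc
    else
      ((match acc.1 with
        | none => some d
        | some e => if d < e then some d else some e),
       (match acc.2 with
        | none => some d
        | some l => if l < d then some d else some l))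

def extract_date_range_alt (plaid_transactions : List (List (String × String))) : Option (String × String) :=
  let st := plaid_transactions.foldl pvStepB (none, none)
  match st.1 with
  | none => none
  | some earliest =>
    match st.2 with
    | none => none
    | some latest => some (earliest, latest)

-- ===== PRECONDITION & SPEC =====
def Spec_extract_date_range (plaid_transactions : List (List (String × String))) (out : Option (String × String)) : Prop := out = extract_date_range_alt plaid_transactions
instance (plaid_transactions : List (List (String × String))) (out : Option (String × String)) : Decidable (Spec_extract_date_range plaid_transactions out) := by unfold Spec_extract_date_range; infer_instance

-- ===== CLAIM (what is proved, stated in full; the proofs are below) =====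
def Claim_equal_extract_date_range : Prop := ∀ (plaid_transactions : List (List (String × String))), Dom_extract_date_range plaid_transactions → Spec_extract_date_range plaid_transactions (extract_date_range plaid_transactions)

-- ===== LEMMAS AND PROOFS =====

-- the per-transaction extracted date, shared shape of both ports' branching
def pvGetD (trans : List (String × String)) : Option String :=
  match (PySem.Dict.mk trans).get? "date" with
  | none => none
  | some d => if d = "" then none else some d

lemma pvDatesA_eq (pts : List (List (String × String))) :
    pvDatesA pts = pts.filterMap pvGetD := by
  simp [pvDatesA, pvGetD]

lemma pvStepB_eq (acc : Option String × Option String) (t : List (String × String)) :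
    pvStepB acc t =
      match pvGetD t with
      | none => acc
      | some d =>
        ((match acc.1 with
          | none => some d
          | some e => if d < e then some d else some e),
         (match acc.2 with
          | none => some d
          | some l => if l < d then some d else some l)) := by
  unfold pvStepB pvGetD
  rcases (PySem.Dict.mk t).get? "date" with _ | d
  · rfl
  · by_cases h : d = "" <;> simp [h]

-- fold with both accumulators set: running min/max over the filtered dates
lemma foldB_some (pts : List (List (String × String))) (e l : String) :
    pts.foldl pvStepB (some e, some l) =
      (some ((pts.filterMap pvGetD).foldl min e),
       some ((pts.filterMap pvGetD).foldl max l)) := by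
  induction pts generalizing e l with
  | nil => simp
  | cons t rest ih =>
    rw [List.foldl_cons, pvStepB_eq]
    rcases hd : pvGetD t with _ | d
    · simpa [List.filterMap_cons, hd] using ih e l
    · simp only [List.filterMap_cons, hd, List.foldl_cons]
      have h1 : (if d < e then some d else some e) = (some (min e d) : Option String) := by
        rw [min_def]; split_ifs with h h' h''
        · exact absurd h' (not_le.mpr h)
        · rfl
        · rfl
        · exact absurd (not_lt.mp h) h''
      have h2 : (if l < d then some d else some l) = (some (max l d) : Option String) := by
        rw [max_def]; split_ifs with h h' h''
        · rfl
        · exact absurd h.le h'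
        · rw [le_antisymm h'' (not_lt.mp h)]
        · rfl
      rw [h1, h2, ih]

-- fold from the empty accumulator, by the shape of the filtered dates list
lemma foldB_none (pts : List (List (String × String))) :
    pts.foldl pvStepB (none, none) =
      match pts.filterMap pvGetD with
      | [] => (none, none)
      | d :: rest => (some (rest.foldl min d), some (rest.foldl max d)) := by
  induction pts with
  | nil => simp
  | cons t rest ih =>
    rw [List.foldl_cons, pvStepB_eq]
    rcases hd : pvGetD t with _ | d
    · simpa [List.filterMap_cons, hd] using ih
    · simp [hd, foldB_some]

-- ===== VERDICT (by name: the statement is the Claim_ definition above) =====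
theorem extract_date_range_spec : Claim_equal_extract_date_range := by
  intro pts _
  unfold Spec_extract_date_range extract_date_range extract_date_range_alt
  rw [foldB_none, pvDatesA_eq]
  rcases hd : pts.filterMap pvGetD with _ | ⟨d, rest⟩
  · simp [hd]
  · rcases pts with _ | ⟨t, pts'⟩
    · simp at hd
    · simp [PySem.List.min?_id_cons, PySem.List.max?_id_cons]
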